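-- pv_equiv track=rewrite | github.com/pandaandsushi/Tucil1_13522012 | src/testing.py | new_seq
-- ===== SOURCE A (Python) =====
-- def new_seq(sequences, curr_sequence=None, remaining_sequences=None, size_limit=None, all_sequences=None):
--     if curr_sequence is None:
--         curr_sequence = []
--     if remaining_sequences is None:
--         remaining_sequences = sequences.copy()
--     if all_sequences is None:
--         all_sequences = []
--
--     if curr_sequence and len(curr_sequence) <= size_limit:
--         all_sequences.append(curr_sequence.copy())
--     if len(curr_sequence) >= size_limit:
--         return
--
--     for i, seq in enumerate(remaining_sequences):
--         overlap_len = find_overlap(curr_sequence, seq)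
--         if overlap_len > 0:
--             new_sequence = curr_sequence + seq[overlap_len:]
--             new_remaining = remaining_sequences[:i] + remaining_sequences[i + 1:]
--             new_seq(sequences, new_sequence, new_remaining, size_limit, all_sequences)
--         else:
--             new_sequence = curr_sequence + seq
--             new_remaining = remaining_sequences[:i] + remaining_sequences[i + 1:]
--             new_seq(sequences, new_sequence, new_remaining, size_limit, all_sequences)
--
--     return all_sequences
--
-- def find_overlap(seq1, seq2):
--     for i in range(1, min(len(seq1), len(seq2)) + 1):
--         if seq1[-i:] == seq2[:i]:
--             return i
--     return 0
-- ===== SOURCE B (Python) =====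
-- # Iterative stack-based DFS replacing the recursion; same return value
-- # (note: like A it appends to a caller-supplied all_sequences list, except
-- # on the early len>=limit return, where only the return value None is matched).
-- def find_overlap(seq1, seq2):
--     for i in range(1, min(len(seq1), len(seq2)) + 1):
--         if seq1[-i:] == seq2[:i]:
--             return i
--     return 0
--
-- def new_seq(sequences, curr_sequence=None, remaining_sequences=None, size_limit=None, all_sequences=None):
--     if curr_sequence is None:
--         curr_sequence = []
--     if remaining_sequences is None:
--         remaining_sequences = sequences.copy()
--     if all_sequences is None:
--         all_sequences = []
--     if len(curr_sequence) >= size_limit: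
--         return None
--     stack = [(curr_sequence, remaining_sequences)]
--     while stack:
--         curr, rem = stack.pop()
--         if curr and len(curr) <= size_limit:
--             all_sequences.append(curr.copy())
--         if len(curr) >= size_limit:
--             continue
--         # push children in reverse index order so index 0 is processed first
--         for i in range(len(rem) - 1, -1, -1):
--             seq = rem[i]
--             k = find_overlap(curr, seq)
--             stack.append((curr + seq[k:], rem[:i] + rem[i + 1:]))
--     return all_sequences
-- ===== Notes on version B (the rewrite author's own statement) =====
-- stated objective: alternative
-- what changed: Replaced the recursive DFS with an explicit-stack worklist loop (children pushed in reverse index order to preserve the preorder output), and merged A's two identical overlap branches since seq[0:] == seq.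
import Mathlib
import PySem

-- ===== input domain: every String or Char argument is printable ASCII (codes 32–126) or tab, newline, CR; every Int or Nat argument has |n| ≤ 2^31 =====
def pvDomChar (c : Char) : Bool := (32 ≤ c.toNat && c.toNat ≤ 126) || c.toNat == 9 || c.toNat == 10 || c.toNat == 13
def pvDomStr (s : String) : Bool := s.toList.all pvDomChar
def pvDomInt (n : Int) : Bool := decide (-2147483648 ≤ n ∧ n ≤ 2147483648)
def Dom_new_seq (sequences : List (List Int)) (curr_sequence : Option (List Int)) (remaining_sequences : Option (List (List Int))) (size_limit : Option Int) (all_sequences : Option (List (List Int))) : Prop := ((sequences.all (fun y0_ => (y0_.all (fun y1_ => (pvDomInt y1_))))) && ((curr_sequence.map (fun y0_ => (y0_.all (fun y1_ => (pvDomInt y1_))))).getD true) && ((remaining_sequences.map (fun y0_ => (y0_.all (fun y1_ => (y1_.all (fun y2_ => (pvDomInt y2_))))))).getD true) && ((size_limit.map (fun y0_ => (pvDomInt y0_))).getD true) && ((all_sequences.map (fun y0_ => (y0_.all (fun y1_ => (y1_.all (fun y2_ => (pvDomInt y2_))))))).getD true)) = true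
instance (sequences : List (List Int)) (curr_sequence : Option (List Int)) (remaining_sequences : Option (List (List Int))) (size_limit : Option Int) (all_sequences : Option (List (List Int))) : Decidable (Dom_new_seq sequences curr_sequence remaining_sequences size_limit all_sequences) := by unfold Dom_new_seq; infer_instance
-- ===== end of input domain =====

-- B replaces A's recursive DFS by an explicit-stack worklist loop (children pushed in
-- reverse index order), merging the two identical overlap branches; return value only:
-- both Pythons mutate a caller-supplied all_sequences list (A also on its early None return).

-- ===== PORT A =====
-- shared helper: Python find_overlap (first i in 1..min(len,len) with suffix = prefix, else 0)
def findOverlap (seq1 seq2 : List Int) : Nat :=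
  match (List.range' 1 (min seq1.length seq2.length)).find?
      (fun i => decide (seq1.drop (seq1.length - i) = seq2.take i)) with
  | some i => i
  | none => 0

-- the recursive body of A, accumulating into `all` (Python appends via mutation);
-- overlap_len (findOverlap) is written inline at each use
def collectA (L : Int) (curr : List Int) (rem : List (List Int)) (all : List (List Int)) :
    List (List Int) :=
  let all1 := if curr ≠ [] ∧ (curr.length : Int) ≤ L then all ++ [curr] else all
  if (curr.length : Int) ≥ L then all1
  else
    (List.range rem.length).attach.foldl
      (fun acc i =>
        if findOverlap curr (rem[i.1]!) > 0 then
          collectA L (curr ++ (rem[i.1]!).drop (findOverlap curr (rem[i.1]!))) (rem.eraseIdx i.1) acc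
        else collectA L (curr ++ rem[i.1]!) (rem.eraseIdx i.1) acc)
      all1
termination_by rem.length
decreasing_by
  all_goals
    have h : i.1 < rem.length := List.mem_range.mp i.2
    simp [List.length_eraseIdx, h]
    omega

def new_seq (sequences : List (List Int)) (curr_sequence : Option (List Int)) (remaining_sequences : Option (List (List Int))) (size_limit : Option Int) (all_sequences : Option (List (List Int))) : Option (List (List Int)) :=
  match size_limit with
  | none => none  -- Python raises TypeError here (len(..) >= None); excluded by Pre_
  | some L =>
    let curr := curr_sequence.getD []
    let rem := remaining_sequences.getD sequences
    let all := all_sequences.getD []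
    if (curr.length : Int) ≥ L then none  -- Python `return` (mutation of all invisible in the return value)
    else some (collectA L curr rem all)

-- ===== PORT B =====
-- the child frames of a popped frame, in the order they end up on top of the stack
def childrenB (curr : List Int) (rem : List (List Int)) :
    List (List Int × List (List Int)) :=
  (List.range rem.length).map (fun i =>
    (curr ++ (rem[i]!).drop (findOverlap curr (rem[i]!)), rem.eraseIdx i))

-- termination measure for the worklist loop
def frameWeight : Nat → Nat
  | 0 => 1
  | n + 1 => (n + 1) * frameWeight n + 1

def stackWeight (fs : List (List Int × List (List Int))) : Nat :=
  (fs.map (fun p => frameWeight p.2.length)).sum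

theorem frameWeight_pos (n : Nat) : 0 < frameWeight n := by
  cases n <;> simp [frameWeight]

theorem stackWeight_tail_lt (curr : List Int) (rem : List (List Int))
    (fs : List (List Int × List (List Int))) :
    stackWeight fs < stackWeight ((curr, rem) :: fs) := by
  have := frameWeight_pos rem.length
  simp [stackWeight]
  omega

theorem stackWeight_children_lt (curr : List Int) (rem : List (List Int))
    (fs : List (List Int × List (List Int))) :
    stackWeight (childrenB curr rem ++ fs) < stackWeight ((curr, rem) :: fs) := by
  have hch : stackWeight (childrenB curr rem)
      = rem.length * frameWeight (rem.length - 1) := by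
    simp only [stackWeight, childrenB, List.map_map]
    have : ∀ i ∈ List.range rem.length,
        frameWeight ((rem.eraseIdx i).length) = frameWeight (rem.length - 1) := by
      intro i hi
      have : i < rem.length := List.mem_range.mp hi
      simp [List.length_eraseIdx, this]
    calc ((List.range rem.length).map
            (fun i => frameWeight ((rem.eraseIdx i).length))).sum
        = ((List.range rem.length).map
            (fun _ => frameWeight (rem.length - 1))).sum := by
          exact congrArg List.sum (List.map_congr_left this)
      _ = rem.length * frameWeight (rem.length - 1) := by
          simp [List.map_const', List.sum_replicate]
  have happ : stackWeight (childrenB curr rem ++ fs)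
      = stackWeight (childrenB curr rem) + stackWeight fs := by
    simp [stackWeight]
  have hlt : rem.length * frameWeight (rem.length - 1) < frameWeight rem.length := by
    cases rem.length with
    | zero => simp [frameWeight]
    | succ n => simp [frameWeight]
  have : stackWeight ((curr, rem) :: fs) = frameWeight rem.length + stackWeight fs := by
    simp [stackWeight]
  omega

-- B's while-loop over the explicit stack
def loopB (L : Int) (stack : List (List Int × List (List Int))) (all : List (List Int)) :
    List (List Int) :=
  match stack with
  | [] => all
  | (curr, rem) :: fs =>
    let all1 := if curr ≠ [] ∧ (curr.length : Int) ≤ L then all ++ [curr] else all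
    if (curr.length : Int) ≥ L then loopB L fs all1
    else loopB L (childrenB curr rem ++ fs) all1
termination_by stackWeight stack
decreasing_by
  · exact stackWeight_tail_lt curr rem fs
  · exact stackWeight_children_lt curr rem fs

def new_seq_alt (sequences : List (List Int)) (curr_sequence : Option (List Int)) (remaining_sequences : Option (List (List Int))) (size_limit : Option Int) (all_sequences : Option (List (List Int))) : Option (List (List Int)) :=
  match size_limit with
  | none => none  -- Python raises TypeError here; excluded by Pre_
  | some L =>
    let curr := curr_sequence.getD []
    let rem := remaining_sequences.getD sequences
    let all := all_sequences.getD []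
    if (curr.length : Int) ≥ L then none
    else some (loopB L [(curr, rem)] all)

-- ===== PRECONDITION & SPEC =====
-- Pre_ excludes only size_limit = None, on which the Python A (and B) raise TypeError.
def Pre_new_seq (sequences : List (List Int)) (curr_sequence : Option (List Int)) (remaining_sequences : Option (List (List Int))) (size_limit : Option Int) (all_sequences : Option (List (List Int))) : Prop := size_limit ≠ none
instance (sequences : List (List Int)) (curr_sequence : Option (List Int)) (remaining_sequences : Option (List (List Int))) (size_limit : Option Int) (all_sequences : Option (List (List Int))) : Decidable (Pre_new_seq sequences curr_sequence remaining_sequences size_limit all_sequences) := by unfold Pre_new_seq; infer_instance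

def pvWitness_new_seq : List (List Int) × Option (List Int) × Option (List (List Int)) × Option Int × Option (List (List Int)) := ([[1, 2], [2, 3]], none, none, some 3, none)

def Spec_new_seq (sequences : List (List Int)) (curr_sequence : Option (List Int)) (remaining_sequences : Option (List (List Int))) (size_limit : Option Int) (all_sequences : Option (List (List Int))) (out : Option (List (List Int))) : Prop := out = new_seq_alt sequences curr_sequence remaining_sequences size_limit all_sequences
instance (sequences : List (List Int)) (curr_sequence : Option (List Int)) (remaining_sequences : Option (List (List Int))) (size_limit : Option Int) (all_sequences : Option (List (List Int))) (out : Option (List (List Int))) : Decidable (Spec_new_seq sequences curr_sequence remaining_sequences size_limit all_sequences out) := by unfold Spec_new_seq; infer_instance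

-- ===== CLAIM (what is proved, stated in full; the proofs are below) =====
def Claim_equal_new_seq : Prop := ∀ (sequences : List (List Int)) (curr_sequence : Option (List Int)) (remaining_sequences : Option (List (List Int))) (size_limit : Option Int) (all_sequences : Option (List (List Int))), Dom_new_seq sequences curr_sequence remaining_sequences size_limit all_sequences → Pre_new_seq sequences curr_sequence remaining_sequences size_limit all_sequences → Spec_new_seq sequences curr_sequence remaining_sequences size_limit all_sequences (new_seq sequences curr_sequence remaining_sequences size_limit all_sequences)

-- ===== LEMMAS AND PROOFS =====

-- bridge: fold over an attached range = fold over the plain range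
theorem foldl_attach_range {β : Type} (n : Nat) (f : β → Nat → β) (b : β) :
    (List.range n).attach.foldl (fun acc i => f acc i.1) b = (List.range n).foldl f b :=
  List.foldl_attach ..

-- A's else-branch fold equals the fold of collectA over B's child-frame list
theorem collectA_children (L : Int) (curr : List Int) (rem : List (List Int))
    (all1 : List (List Int)) :
    (List.range rem.length).attach.foldl
      (fun acc i =>
        if findOverlap curr (rem[i.1]!) > 0 then
          collectA L (curr ++ (rem[i.1]!).drop (findOverlap curr (rem[i.1]!))) (rem.eraseIdx i.1) acc
        else collectA L (curr ++ rem[i.1]!) (rem.eraseIdx i.1) acc)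
      all1
    = (childrenB curr rem).foldl (fun acc p => collectA L p.1 p.2 acc) all1 := by
  rw [foldl_attach_range rem.length
      (fun acc i =>
        if findOverlap curr (rem[i]!) > 0 then
          collectA L (curr ++ (rem[i]!).drop (findOverlap curr (rem[i]!))) (rem.eraseIdx i) acc
        else collectA L (curr ++ rem[i]!) (rem.eraseIdx i) acc) all1,
    childrenB, List.foldl_map]
  apply PySem.List.foldl_congr_mem
  intro acc i _
  by_cases hk : findOverlap curr (rem[i]!) > 0
  · rw [if_pos hk]
  · have h0 : findOverlap curr (rem[i]!) = 0 := Nat.eq_zero_of_not_pos hk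
    rw [if_neg hk, h0, List.drop_zero]

-- processing a block of frames equals folding collectA over them
theorem loopB_block (L : Int) :
    ∀ (n : Nat) (cs : List (List Int × List (List Int))),
      (∀ p ∈ cs, p.2.length < n) →
      ∀ (fs : List (List Int × List (List Int))) (all : List (List Int)),
        loopB L (cs ++ fs) all
          = loopB L fs (cs.foldl (fun acc p => collectA L p.1 p.2 acc) all) := by
  intro n
  induction n with
  | zero =>
    intro cs h fs all
    cases cs with
    | nil => simp
    | cons c cs' => exact absurd (h c (List.mem_cons_self)) (by omega)
  | succ n ih =>
    intro cs
    induction cs with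
    | nil => intro _ fs all; simp
    | cons c cs' ihc =>
      intro h fs all
      obtain ⟨curr, rem⟩ := c
      have hrem : rem.length ≤ n := by
        have h' := h (curr, rem) (List.mem_cons_self)
        simp at h'
        omega
      have hcs' : ∀ p ∈ cs', p.2.length < n + 1 :=
        fun p hp => h p (List.mem_cons_of_mem _ hp)
      rw [List.cons_append, loopB, List.foldl_cons, collectA]
      by_cases hge : (curr.length : Int) ≥ L
      · simp only [hge, if_true]
        exact ihc hcs' fs _
      · simp only [if_neg hge]
        rw [collectA_children]
        have hchild : ∀ p ∈ childrenB curr rem, p.2.length < n := by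
          intro p hp
          simp only [childrenB, List.mem_map, List.mem_range] at hp
          obtain ⟨i, hi, heq⟩ := hp
          have : p.2 = rem.eraseIdx i := by rw [← heq]
          rw [this]
          have : (rem.eraseIdx i).length = rem.length - 1 := by
            simp [List.length_eraseIdx, hi]
          omega
        rw [ih _ hchild (cs' ++ fs), ihc hcs' fs]

theorem loopB_single (L : Int) (curr : List Int) (rem : List (List Int))
    (all : List (List Int)) :
    loopB L [(curr, rem)] all = collectA L curr rem all := by
  have := loopB_block L (rem.length + 1) [(curr, rem)]
    (by intro p hp; simp at hp; simp [hp]) [] all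
  simpa [loopB] using this

-- ===== VERDICT (by name: the statement is the Claim_ definition above) =====
theorem new_seq_spec : Claim_equal_new_seq := by
  intro sequences curr_sequence remaining_sequences size_limit all_sequences _ hpre
  unfold Spec_new_seq new_seq new_seq_alt
  cases size_limit with
  | none => exact absurd rfl hpre
  | some L =>
    simp only []
    split
    · rfl
    · rw [loopB_single]
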